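-- pv_equiv track=rewrite | github.com/glangsto/analyze | htmlevents.py | matchClose
-- ===== SOURCE A (Python) =====
-- def matchClose( nall, matchcount, matchindex, dd = 10.*60./86400.) :
--     """
--     Count nearby in time, but not close enough to be an exact match
--     """
--     # for all events,
--     for iii in range(nall):
--         # if an already counted match
--         if matchcount[iii] < 1:
--             continue
--         mmm = (nall - iii) - 1
--         # look at all other events
--         for jjj in range(mmm):
--             # starting at one after the current event
--             kkk = iii + jjj + 1
--             # if not already counted as an event
--             if matchcount[kkk] > 0:
--                 # if a match of time
--                 matchcount[kkk] = -1
--                 matchindex[kkk] = -1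
--     return matchcount, matchindex
-- ===== SOURCE B (Python) =====
-- def matchClose(nall, matchcount, matchindex, dd=10.*60./86400.):
--     """Find the first counted match, then one pass marking later positives."""
--     first = -1
--     for i in range(nall):
--         if matchcount[i] >= 1:
--             first = i
--             break
--     if first >= 0:
--         for k in range(first + 1, nall):
--             if matchcount[k] > 0:
--                 matchcount[k] = -1
--                 matchindex[k] = -1
--     return matchcount, matchindex
-- ===== Notes on version B (the rewrite author's own statement) =====
-- stated objective: simpler
-- what changed: Replaces A's nested loops (which rescan the tail whenever an outer entry is still >=1) by a single search for the first counted entry followed by one linear marking pass over the tail; A's inner loop in fact only ever fires for that first entry, so one pass suffices.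
import Mathlib
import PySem

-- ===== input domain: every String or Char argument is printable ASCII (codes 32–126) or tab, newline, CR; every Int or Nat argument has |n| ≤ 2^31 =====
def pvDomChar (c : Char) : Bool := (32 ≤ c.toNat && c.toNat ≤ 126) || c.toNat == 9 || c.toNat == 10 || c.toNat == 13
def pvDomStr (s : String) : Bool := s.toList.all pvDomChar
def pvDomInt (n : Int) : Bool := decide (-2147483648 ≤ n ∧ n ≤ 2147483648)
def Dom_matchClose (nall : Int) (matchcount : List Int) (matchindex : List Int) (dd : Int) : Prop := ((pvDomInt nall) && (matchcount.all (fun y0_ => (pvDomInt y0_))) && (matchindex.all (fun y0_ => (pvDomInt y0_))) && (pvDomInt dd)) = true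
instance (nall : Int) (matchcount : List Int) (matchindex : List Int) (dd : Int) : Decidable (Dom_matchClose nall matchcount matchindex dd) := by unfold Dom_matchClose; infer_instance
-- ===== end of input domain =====

-- B replaces A's nested loops by "find the first counted entry, then one marking pass";
-- objective: simpler (same O(n) cost).  Both the Python A and the Python B mutate
-- matchcount/matchindex in place in the same way; the theorems are about the returned pair.

-- shared loop body of both Pythons: mark event k as already counted
def pvMark (st : List Int × List Int) (k : Nat) : List Int × List Int :=
  if 0 < st.1.getD k 0 then (st.1.set k (-1), st.2.set k (-1)) else st

-- ===== PORT A =====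
def matchClose (nall : Int) (matchcount : List Int) (matchindex : List Int) (dd : Int) : List Int × List Int :=
  (List.range nall.toNat).foldl
    (fun st iii =>
      if st.1.getD iii 0 < 1 then st
      else
        (List.range (nall.toNat - iii - 1)).foldl
          (fun st2 jjj => pvMark st2 (iii + jjj + 1)) st)
    (matchcount, matchindex)

-- ===== PORT B =====
-- the explicit search loop with break in Source B
def pvFindFirst (mc : List Int) : List Nat → Option Nat
  | [] => none
  | i :: rest => if 1 ≤ mc.getD i 0 then some i else pvFindFirst mc rest

def matchClose_alt (nall : Int) (matchcount : List Int) (matchindex : List Int) (dd : Int) : List Int × List Int :=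
  match pvFindFirst matchcount (List.range nall.toNat) with
  | none => (matchcount, matchindex)
  | some first =>
      (List.range' (first + 1) (nall.toNat - (first + 1))).foldl pvMark (matchcount, matchindex)

-- ===== PRECONDITION & SPEC =====
-- Pre_ excludes exactly the inputs where Python A raises IndexError: nall beyond matchcount's
-- length, or a marked position k (positive count with an earlier counted entry) beyond
-- matchindex's length.
def Pre_matchClose (nall : Int) (matchcount : List Int) (matchindex : List Int) (dd : Int) : Prop :=
  nall ≤ (matchcount.length : Int) ∧
  ∀ k, k < matchcount.length → (k : Int) < nall →
    (0 < matchcount.getD k 0 ∧ ∃ i < k, 1 ≤ matchcount.getD i 0) → k < matchindex.length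
instance (nall : Int) (matchcount : List Int) (matchindex : List Int) (dd : Int) : Decidable (Pre_matchClose nall matchcount matchindex dd) := by unfold Pre_matchClose; infer_instance

def pvWitness_matchClose : Int × List Int × List Int × Int := (2, [1, 1], [5, 5], 0)

def Spec_matchClose (nall : Int) (matchcount : List Int) (matchindex : List Int) (dd : Int) (out : List Int × List Int) : Prop := out = matchClose_alt nall matchcount matchindex dd
instance (nall : Int) (matchcount : List Int) (matchindex : List Int) (dd : Int) (out : List Int × List Int) : Decidable (Spec_matchClose nall matchcount matchindex dd out) := by unfold Spec_matchClose; infer_instance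

-- ===== CLAIM (what is proved, stated in full; the proofs are below) =====
def Claim_equal_matchClose : Prop := ∀ (nall : Int) (matchcount : List Int) (matchindex : List Int) (dd : Int), Dom_matchClose nall matchcount matchindex dd → Pre_matchClose nall matchcount matchindex dd → Spec_matchClose nall matchcount matchindex dd (matchClose nall matchcount matchindex dd)

-- ===== LEMMAS AND PROOFS =====

theorem foldl_id {α β : Type} (f : α → β → α) (l : List β) (s : α)
    (h : ∀ x ∈ l, f s x = s) : l.foldl f s = s := by
  induction l with
  | nil => rfl
  | cons x xs ih =>
      simp only [List.foldl_cons, h x (List.mem_cons_self)]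
      exact ih (fun y hy => h y (List.mem_cons_of_mem _ hy))

theorem pvMark_len (st : List Int × List Int) (k : Nat) :
    (pvMark st k).1.length = st.1.length := by
  unfold pvMark; split <;> simp

theorem pvMark_nonpos (st : List Int × List Int) (x k : Nat)
    (h : st.1.getD k 0 ≤ 0) : (pvMark st x).1.getD k 0 ≤ 0 := by
  unfold pvMark
  split
  · simp only [List.getD_eq_getElem?_getD, List.getElem?_set]
    by_cases hx : x = k
    · subst hx
      by_cases hl : x < st.1.length <;> simp [hl]
    · simpa [hx] using h
  · exact h

theorem pvMark_self (st : List Int × List Int) (k : Nat) (hk : k < st.1.length) :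
    (pvMark st k).1.getD k 0 ≤ 0 := by
  unfold pvMark
  split
  · simp [List.getD_eq_getElem?_getD, hk]
  · omega

theorem foldl_pvMark_nonpos (l : List Nat) :
    ∀ (st : List Int × List Int) (k : Nat), st.1.getD k 0 ≤ 0 →
      (l.foldl pvMark st).1.getD k 0 ≤ 0 := by
  induction l with
  | nil => intro st k h; simpa using h
  | cons x xs ih =>
      intro st k h
      simpa using ih (pvMark st x) k (pvMark_nonpos st x k h)

theorem foldl_pvMark_hit (l : List Nat) :
    ∀ (st : List Int × List Int) (k : Nat), k ∈ l → k < st.1.length →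
      (l.foldl pvMark st).1.getD k 0 ≤ 0 := by
  induction l with
  | nil => intro st k h; simp at h
  | cons x xs ih =>
      intro st k hmem hlen
      rcases List.mem_cons.mp hmem with h | h
      · subst h
        simpa using foldl_pvMark_nonpos xs (pvMark st k) k (pvMark_self st k hlen)
      · simpa using ih (pvMark st x) k h (by rw [pvMark_len]; exact hlen)

theorem pvFindFirst_none (mc : List Int) (l : List Nat)
    (h : pvFindFirst mc l = none) : ∀ x ∈ l, mc.getD x 0 < 1 := by
  induction l with
  | nil => intro x hx; simp at hx
  | cons y ys ih =>
      intro x hx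
      unfold pvFindFirst at h
      split at h
      · exact absurd h (by simp)
      · rcases List.mem_cons.mp hx with rfl | hx'
        · omega
        · exact ih h x hx'

theorem pvFindFirst_some (mc : List Int) (l : List Nat) (b : Nat)
    (h : pvFindFirst mc l = some b) :
    ∃ l1 l2, l = l1 ++ b :: l2 ∧ (∀ x ∈ l1, mc.getD x 0 < 1) ∧ 1 ≤ mc.getD b 0 := by
  induction l with
  | nil => simp [pvFindFirst] at h
  | cons y ys ih =>
      unfold pvFindFirst at h
      split at h
      · rename_i hy
        cases h
        exact ⟨[], ys, rfl, by simp, hy⟩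
      · rename_i hy
        obtain ⟨l1, l2, heq, hl1, hb⟩ := ih h
        refine ⟨y :: l1, l2, by simp [heq], ?_, hb⟩
        intro x hx
        rcases List.mem_cons.mp hx with rfl | hx'
        · omega
        · exact hl1 x hx'

theorem inner_eq (iii m : Nat) (st : List Int × List Int) :
    (List.range m).foldl (fun st2 jjj => pvMark st2 (iii + jjj + 1)) st
      = (List.range' (iii + 1) m).foldl pvMark st := by
  rw [List.range'_eq_map_range, List.foldl_map]
  congr 1
  funext st2 j
  congr 1
  omega

theorem main_aux (n : Nat) (mc mi : List Int) (hn : n ≤ mc.length) :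
    (List.range n).foldl
      (fun st iii =>
        if st.1.getD iii 0 < 1 then st
        else (List.range (n - iii - 1)).foldl (fun st2 jjj => pvMark st2 (iii + jjj + 1)) st)
      (mc, mi)
    = (match pvFindFirst mc (List.range n) with
       | none => (mc, mi)
       | some first => (List.range' (first + 1) (n - (first + 1))).foldl pvMark (mc, mi)) := by
  cases h : pvFindFirst mc (List.range n) with
  | none =>
      apply foldl_id
      intro x hx
      exact if_pos (pvFindFirst_none mc _ h x hx)
  | some b =>
      obtain ⟨l1, l2, hsplit, hl1, hb⟩ := pvFindFirst_some mc _ b h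
      have hdrop : b :: l2 = List.range' (l1.length + 1 - 1) (n - l1.length) := by
        have h1 := congrArg (List.drop l1.length) hsplit
        rw [List.drop_left] at h1
        rw [← h1, List.range_eq_range', List.drop_range']
        simp
      have hpos : 1 ≤ n - l1.length := by
        by_contra hc
        have : n - l1.length = 0 := by omega
        rw [this] at hdrop
        simp at hdrop
      obtain ⟨m, hm⟩ : ∃ m, n - l1.length = m + 1 := ⟨n - l1.length - 1, by omega⟩
      rw [hm, List.range'_succ] at hdrop
      have hb_eq : b = l1.length := by
        have := List.head_eq_of_cons_eq hdrop
        omega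
      have hl2 : l2 = List.range' (b + 1) (n - b - 1) := by
        have htail := List.tail_eq_of_cons_eq hdrop
        rw [htail, hb_eq]
        congr 1
        omega
      have hbn : b < n := by omega
      rw [hsplit, List.foldl_append]
      rw [foldl_id _ l1 (mc, mi) (fun x hx => if_pos (hl1 x hx))]
      rw [List.foldl_cons]
      rw [if_neg (by simp only []; omega)]
      rw [inner_eq b (n - b - 1) (mc, mi)]
      have hmatch : (match some b with
          | none => (mc, mi)
          | some first => List.foldl pvMark (mc, mi) (List.range' (first + 1) (n - (first + 1))))
          = List.foldl pvMark (mc, mi) (List.range' (b + 1) (n - b - 1)) := by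
        have hstep : n - (b + 1) = n - b - 1 := by omega
        simp [hstep]
      rw [hmatch]
      apply foldl_id
      intro x hx
      have hxr : x ∈ List.range' (b + 1) (n - b - 1) := by rwa [hl2] at hx
      have hxn : x < n := by
        have := List.mem_range'_1.mp hxr
        omega
      have hle := foldl_pvMark_hit (List.range' (b + 1) (n - b - 1)) (mc, mi) x hxr
        (by simpa using lt_of_lt_of_le hxn hn)
      exact if_pos (by omega)

-- ===== VERDICT (by name: the statement is the Claim_ definition above) =====
theorem matchClose_spec : Claim_equal_matchClose := by
  intro nall mc mi dd _hdom hpre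
  unfold Spec_matchClose matchClose matchClose_alt
  exact main_aux nall.toNat mc mi (by
    have h1 := hpre.1
    omega)
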